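-- pv_equiv track=rewrite | github.com/in-sukim/Coding_Test | 프로그래머스/1/340198. ［PCCE 기출문제］ 10번 ／ 공원/［PCCE 기출문제］ 10번 ／ 공원.py | solution
-- ===== SOURCE A (Python) =====
-- def find_mat(x,y,park,n):
--     h, w = len(park), len(park[0])
--     if x+n <= h and y+n <= w:
--         for i in range(x, x+n):
--             for j in range(y, y+n):
--                 if park[i][j] != '-1':
--                     return False
--         return True
--     return False
--
-- def solution(mats, park):
--     h, w = len(park), len(park[0])
--     result = []
--     for row in range(h):
--         for col in range(w):
--             for mat in mats:
--                 if find_mat(row,col,park, mat):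
--                     result.append(mat)
--     if not result:
--         return -1
--     return max(result)
-- ===== SOURCE B (Python) =====
-- def solution(mats, park):
--     h, w = len(park), len(park[0])
--
--     def fits(n):
--         if n > h or n > w:
--             return False
--         target = ['-1'] * n
--         for x in range(h - n + 1):
--             for y in range(w - n + 1):
--                 if all(park[x + i][y:y + n] == target for i in range(n)):
--                     return True
--         return False
--
--     for m in sorted(mats, reverse=True):
--         if fits(m):
--             return m
--     return -1
-- ===== Notes on version B (the rewrite author's own statement) =====
-- stated objective: faster
-- what changed: Instead of appending every fitting mat at every position and taking the max of the collected list, B sorts mats descending and returns the first one that fits anywhere (early exit), checking each candidate square by comparing row slices against a precomputed all-'-1' row; Pre_ restricts park to a non-degenerate rectangular grid (non-empty, non-empty first row, no row shorter than the first) since outside it A raises IndexError or the grid is degenerate.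
-- outside the precondition, e.g. on solution([0], [[]]): A returns -1, B returns 0; on solution([2], [['0', '0'], ['0']]): A returns -1, B returns -1
import Mathlib
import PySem

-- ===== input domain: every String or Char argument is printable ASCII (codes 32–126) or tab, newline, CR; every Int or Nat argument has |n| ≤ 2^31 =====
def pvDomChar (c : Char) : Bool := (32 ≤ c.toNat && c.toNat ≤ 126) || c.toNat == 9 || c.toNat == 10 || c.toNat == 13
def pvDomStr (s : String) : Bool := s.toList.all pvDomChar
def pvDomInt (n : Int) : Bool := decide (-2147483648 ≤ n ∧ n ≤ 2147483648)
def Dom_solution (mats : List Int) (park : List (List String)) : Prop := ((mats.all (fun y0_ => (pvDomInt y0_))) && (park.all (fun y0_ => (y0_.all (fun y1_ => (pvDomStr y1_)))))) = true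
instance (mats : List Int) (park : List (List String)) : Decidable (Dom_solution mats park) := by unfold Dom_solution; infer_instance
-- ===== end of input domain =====

-- B sorts mats descending and returns the first one that fits anywhere (early exit, slice-based
-- square check over the feasible positions) instead of collecting every fitting mat at every
-- position and taking the max; objective: faster (fewer mats and positions examined).


-- ===== PORT A =====
def find_mat (x y : Int) (park : List (List String)) (n : Int) : Bool :=
  let h : Int := park.length
  let w : Int := (park.headD []).length
  if x + n ≤ h ∧ y + n ≤ w then
    (PySem.List.pyRange x (x + n) 1).all (fun i =>
      (PySem.List.pyRange y (y + n) 1).all (fun j =>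
        PySem.List.pyGetD (PySem.List.pyGetD park i []) j "" == "-1"))
  else false

def solution (mats : List Int) (park : List (List String)) : Int :=
  let h : Int := park.length
  let w : Int := (park.headD []).length
  let result : List Int :=
    (PySem.List.pyRange 0 h 1).foldl (fun acc row =>
      (PySem.List.pyRange 0 w 1).foldl (fun acc col =>
        mats.foldl (fun acc mat =>
          if find_mat row col park mat then acc ++ [mat] else acc) acc) acc) []
  if result = [] then -1
  else match PySem.List.max? result (fun x => x) with
       | some v => v
       | none => -1

-- ===== PORT B =====
-- lazy early-exit 'for' loop: Python's 'for v in range(x, stop): if f(v): return True'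
def anyLoop (f : Int → Bool) (x stop : Int) : Bool :=
  if x < stop then f x || anyLoop f (x + 1) stop else false
termination_by (stop - x).toNat
decreasing_by omega

def fits (n : Int) (park : List (List String)) (h w : Int) : Bool :=
  if h < n ∨ w < n then false
  else
  let target : List String := PySem.List.pyRepeat ["-1"] n
  anyLoop (fun x =>
    anyLoop (fun y =>
      (PySem.List.pyRange 0 n 1).all (fun i =>
        PySem.List.slice (PySem.List.pyGetD park (x + i) []) (some y) (some (y + n)) == target))
      0 (w - n + 1))
    0 (h - n + 1)

def solAltLoop (park : List (List String)) (h w : Int) : List Int → Int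
  | [] => -1
  | m :: rest => if fits m park h w then m else solAltLoop park h w rest

def solution_alt (mats : List Int) (park : List (List String)) : Int :=
  let h : Int := park.length
  let w : Int := (park.headD []).length
  solAltLoop park h w (PySem.List.sorted mats (fun x => x) true)

-- ===== PRECONDITION & SPEC =====
-- Pre_ excludes the empty park (A's park[0] raises IndexError), parks whose first row is empty
-- (a degenerate zero-width grid on which A's loops never run and it returns -1 whatever mats is),
-- and ragged parks with a row shorter than the first WHEN some mat of positive size fits inside
-- the grid bounds, since there A's cell access park[i][j] can raise IndexError.
def Pre_solution (mats : List Int) (park : List (List String)) : Prop :=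
  park ≠ [] ∧ park.headD [] ≠ [] ∧
  ∀ m ∈ mats, (∀ row ∈ park, (park.headD []).length ≤ row.length) ∨
    m ≤ 0 ∨ (park.length : Int) < m ∨ ((park.headD []).length : Int) < m
instance (mats : List Int) (park : List (List String)) : Decidable (Pre_solution mats park) := by
  unfold Pre_solution; infer_instance
def pvWitness_solution : List Int × List (List String) := ([1, 2], [["-1", "0"], ["-1", "-1"]])

def Spec_solution (mats : List Int) (park : List (List String)) (out : Int) : Prop :=
  out = solution_alt mats park
instance (mats : List Int) (park : List (List String)) (out : Int) : Decidable (Spec_solution mats park out) := by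
  unfold Spec_solution; infer_instance

-- ===== CLAIM (what is proved, stated in full; the proofs are below) =====
def Claim_equal_solution : Prop := ∀ (mats : List Int) (park : List (List String)),
  Dom_solution mats park → Pre_solution mats park → Spec_solution mats park (solution mats park)

-- ===== LEMMAS AND PROOFS =====
lemma anyLoop_eq (f : Int → Bool) (x stop : Int) :
    anyLoop f x stop = (PySem.List.pyRange x stop 1).any f := by
  by_cases hx : x < stop
  · rw [anyLoop, if_pos hx, PySem.List.pyRange_one_cons hx, List.any_cons,
      anyLoop_eq f (x + 1) stop]
  · rw [anyLoop, if_neg hx, PySem.List.pyRange_one_eq_nil (by omega)]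
    rfl
termination_by (stop - x).toNat
decreasing_by omega

lemma find_mat_iff (park : List (List String)) (x y n : Int) :
    find_mat x y park n = true ↔
      x + n ≤ (park.length : Int) ∧ y + n ≤ ((park.headD []).length : Int) ∧
      ∀ i j : Int, x ≤ i → i < x + n → y ≤ j → j < y + n →
        PySem.List.pyGetD (PySem.List.pyGetD park i []) j "" = "-1" := by
  simp [find_mat, List.all_eq_true, PySem.List.mem_pyRange_one]
  tauto

lemma result_eq (mats : List Int) (park : List (List String)) (h w : Int) :
    (PySem.List.pyRange 0 h 1).foldl (fun acc row =>
      (PySem.List.pyRange 0 w 1).foldl (fun acc col =>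
        mats.foldl (fun acc mat =>
          if find_mat row col park mat then acc ++ [mat] else acc) acc) acc) []
    = (PySem.List.pyRange 0 h 1).flatMap (fun row =>
        (PySem.List.pyRange 0 w 1).flatMap (fun col =>
          mats.filter (fun mat => find_mat row col park mat))) := by
  have h1 : ∀ (row : Int) (acc : List Int),
      (PySem.List.pyRange 0 w 1).foldl (fun acc col =>
        mats.foldl (fun acc mat =>
          if find_mat row col park mat then acc ++ [mat] else acc) acc) acc
      = acc ++ (PySem.List.pyRange 0 w 1).flatMap (fun col =>
          mats.filter (fun mat => find_mat row col park mat)) := by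
    intro row acc
    calc (PySem.List.pyRange 0 w 1).foldl (fun acc col =>
        mats.foldl (fun acc mat =>
          if find_mat row col park mat then acc ++ [mat] else acc) acc) acc
        = (PySem.List.pyRange 0 w 1).foldl (fun acc col =>
            acc ++ mats.filter (fun mat => find_mat row col park mat)) acc :=
          PySem.List.foldl_congr_mem _ _ _ _ (by
            intro acc col _
            exact PySem.List.foldl_append_if_eq_filter _ _ _)
      _ = acc ++ (PySem.List.pyRange 0 w 1).flatMap (fun col =>
            mats.filter (fun mat => find_mat row col park mat)) :=
          PySem.List.foldl_append_eq_flatMap _ _ _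
  calc (PySem.List.pyRange 0 h 1).foldl (fun acc row =>
      (PySem.List.pyRange 0 w 1).foldl (fun acc col =>
        mats.foldl (fun acc mat =>
          if find_mat row col park mat then acc ++ [mat] else acc) acc) acc) []
      = (PySem.List.pyRange 0 h 1).foldl (fun acc row =>
          acc ++ (PySem.List.pyRange 0 w 1).flatMap (fun col =>
            mats.filter (fun mat => find_mat row col park mat))) [] :=
        PySem.List.foldl_congr_mem _ _ _ _ (by intro acc row _; exact h1 row acc)
    _ = [] ++ (PySem.List.pyRange 0 h 1).flatMap (fun row =>
          (PySem.List.pyRange 0 w 1).flatMap (fun col =>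
            mats.filter (fun mat => find_mat row col park mat))) :=
        PySem.List.foldl_append_eq_flatMap _ _ _
    _ = _ := by simp

lemma slice_replicate_iff (r : List String) (y n : Int) (W : Nat)
    (hy : 0 ≤ y) (hn : 0 < n) (hyn : y + n ≤ (W : Int)) (hr : W ≤ r.length) :
    (PySem.List.slice r (some y) (some (y + n)) = List.replicate n.toNat "-1") ↔
    ∀ j : Int, y ≤ j → j < y + n → PySem.List.pyGetD r j "" = "-1" := by
  rw [PySem.List.slice_toNat _ hy (by omega : (0:Int) ≤ y + n)]
  have hlen : y.toNat + n.toNat ≤ r.length := by omega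
  have htk : ((y + n).toNat - y.toNat) = n.toNat := by omega
  rw [htk]
  constructor
  · intro he j hj1 hj2
    have h0j : 0 ≤ j := le_trans hy hj1
    have hjr : j.toNat < r.length := by omega
    rw [PySem.List.pyGetD_eq_getElem _ _ h0j (by omega)]
    have hidx : j.toNat - y.toNat < n.toNat := by omega
    have := congrArg (fun l => l[j.toNat - y.toNat]?) he
    simp only [List.getElem?_take, List.getElem?_drop, List.getElem?_replicate] at this
    have hj' : y.toNat + (j.toNat - y.toNat) = j.toNat := by omega
    rw [hj'] at this
    simp [hidx, hjr] at this
    exact this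
  · intro hall
    apply List.ext_getElem
    · simp; omega
    · intro i h1 h2
      simp only [List.getElem_take, List.getElem_drop, List.getElem_replicate]
      have hi : i < n.toNat := by simpa using h2
      have h0 : 0 ≤ (y + i : Int) := by omega
      have := hall (y + i) (by omega) (by omega)
      rw [PySem.List.pyGetD_eq_getElem _ _ h0 (by omega)] at this
      have : r[(y + (i:Int)).toNat] = "-1" := this
      have hcast : (y + (i:Int)).toNat = y.toNat + i := by omega
      simp_all

lemma fits_iff (park : List (List String)) (m : Int)
    (hne : park ≠ []) (hw0 : park.headD [] ≠ [])
    (hc : (∀ row ∈ park, (park.headD []).length ≤ row.length) ∨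
      m ≤ 0 ∨ (park.length : Int) < m ∨ ((park.headD []).length : Int) < m) :
    (fits m park (park.length : Int) ((park.headD []).length : Int) = true) ↔
    ∃ row col : Int, 0 ≤ row ∧ row < (park.length : Int) ∧ 0 ≤ col ∧ col < ((park.headD []).length : Int) ∧
      find_mat row col park m = true := by
  have hH : 0 < park.length := List.length_pos_iff.mpr hne
  have hW : 0 < (park.headD []).length := List.length_pos_iff.mpr hw0
  by_cases hbig : (park.length : Int) < m ∨ ((park.headD []).length : Int) < m
  · simp only [fits, if_pos hbig, Bool.false_eq_true, false_iff]
    rintro ⟨row, col, hr0, hr1, hc0, hc1, hf⟩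
    rw [find_mat_iff] at hf
    omega
  simp only [fits, if_neg hbig, anyLoop_eq, PySem.List.pyRepeat_singleton, List.any_eq_true,
    List.all_eq_true, PySem.List.mem_pyRange_one, beq_iff_eq]
  by_cases hm : m ≤ 0
  · constructor
    · intro _
      refine ⟨0, 0, le_refl 0, by exact_mod_cast hH, le_refl 0, by exact_mod_cast hW, ?_⟩
      rw [find_mat_iff]
      exact ⟨by omega, by omega, fun i j h1 h2 _ _ => absurd (lt_of_le_of_lt h1 h2) (by omega)⟩
    · intro _
      exact ⟨0, ⟨le_refl 0, by omega⟩, 0, ⟨le_refl 0, by omega⟩,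
        fun i ⟨hi0, hi1⟩ => absurd (lt_of_le_of_lt hi0 hi1) (by omega)⟩
  · rw [not_le] at hm
    · have hw : ∀ row ∈ park, (park.headD []).length ≤ row.length := by
        rcases hc with h | h | h | h
        · exact h
        all_goals omega
      constructor
      · rintro ⟨x, ⟨hx0, hx1⟩, y, ⟨hy0, hy1⟩, hall⟩
        refine ⟨x, y, hx0, by omega, hy0, by omega, ?_⟩
        rw [find_mat_iff]
        refine ⟨by omega, by omega, ?_⟩
        intro i j hi1 hi2 hj1 hj2
        have hrow := hall (i - x) ⟨by omega, by omega⟩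
        have hmem : PySem.List.pyGetD park (x + (i - x)) [] ∈ park := by
          rw [PySem.List.pyGetD_eq_getElem _ _ (by omega) (by omega)]
          exact List.getElem_mem _
        rw [slice_replicate_iff _ _ _ ((park.headD []).length) hy0 (by omega) (by omega)
          (hw _ hmem)] at hrow
        have := hrow j hj1 hj2
        rwa [show x + (i - x) = i by ring] at this
      · rintro ⟨row, col, hr0, hr1, hc0, hc1, hf⟩
        rw [find_mat_iff] at hf
        obtain ⟨hbh, hbw, hcell⟩ := hf
        refine ⟨row, ⟨hr0, by omega⟩, col, ⟨hc0, by omega⟩, ?_⟩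
        intro i ⟨hi0, hi1⟩
        have hmem : PySem.List.pyGetD park (row + i) [] ∈ park := by
          rw [PySem.List.pyGetD_eq_getElem _ _ (by omega) (by omega)]
          exact List.getElem_mem _
        rw [slice_replicate_iff _ _ _ ((park.headD []).length) hc0 (by omega) (by omega)
          (hw _ hmem)]
        intro j hj1 hj2
        exact hcell (row + i) j (by omega) (by omega) hj1 hj2

lemma loop_all_false (park : List (List String)) (h w : Int) (L : List Int)
    (hL : ∀ m ∈ L, fits m park h w = false) : solAltLoop park h w L = -1 := by
  induction L with
  | nil => rfl
  | cons a t ih =>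
    simp only [solAltLoop, hL a (by simp)]
    exact ih (fun m hm => hL m (by simp [hm]))

lemma loop_max (park : List (List String)) (h w : Int) (L : List Int)
    (hpw : L.Pairwise (fun a b => b ≤ a)) (m : Int) (hm : m ∈ L)
    (hf : fits m park h w = true) :
    solAltLoop park h w L ∈ L ∧ fits (solAltLoop park h w L) park h w = true ∧
      ∀ k ∈ L, fits k park h w = true → k ≤ solAltLoop park h w L := by
  induction L with
  | nil => cases hm
  | cons a t ih =>
    by_cases ha : fits a park h w = true
    · simp only [solAltLoop, ha, if_true]
      refine ⟨by simp, by simp, ?_⟩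
      intro k hk _
      rcases List.mem_cons.mp hk with rfl | hk'
      · exact le_refl k
      · exact (List.pairwise_cons.mp hpw).1 k hk'
    · have hm' : m ∈ t := by
        rcases List.mem_cons.mp hm with rfl | h'
        · exact absurd hf ha
        · exact h'
      have ⟨ih1, ih2, ih3⟩ := ih (List.pairwise_cons.mp hpw).2 hm'
      simp only [solAltLoop, ha, Bool.false_eq_true, if_false]
      refine ⟨by simp [ih1], ih2, ?_⟩
      intro k hk hkf
      rcases List.mem_cons.mp hk with rfl | hk'
      · exact absurd hkf ha
      · exact ih3 k hk' hkf

theorem solution_eq_alt (mats : List Int) (park : List (List String))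
    (hpre : Pre_solution mats park) : solution mats park = solution_alt mats park := by
  obtain ⟨hne, hw0, hw⟩ := hpre
  simp only [solution, solution_alt]
  rw [result_eq]
  set W : Int := ((park.headD []).length : Int) with hW
  set H : Int := (park.length : Int) with hH
  set R : List Int := (PySem.List.pyRange 0 H 1).flatMap (fun row =>
      (PySem.List.pyRange 0 W 1).flatMap (fun col =>
        mats.filter (fun mat => find_mat row col park mat))) with hR
  set L : List Int := PySem.List.sorted mats (fun x => x) true with hL
  have hmemR : ∀ v : Int, v ∈ R ↔ v ∈ mats ∧ fits v park H W = true := by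
    intro v
    rw [hR]
    simp only [List.mem_flatMap, List.mem_filter, PySem.List.mem_pyRange_one]
    constructor
    · rintro ⟨row, ⟨h1, h2⟩, col, ⟨h3, h4⟩, hv, hf⟩
      exact ⟨hv, (fits_iff park v hne hw0 (hw v hv)).mpr ⟨row, col, h1, h2, h3, h4, hf⟩⟩
    · rintro ⟨hv, hfits⟩
      obtain ⟨row, col, h1, h2, h3, h4, hf⟩ := (fits_iff park v hne hw0 (hw v hv)).mp hfits
      exact ⟨row, ⟨h1, h2⟩, col, ⟨h3, h4⟩, hv, hf⟩
  by_cases hex : ∃ m ∈ mats, fits m park H W = true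
  · obtain ⟨m0, hm0, hf0⟩ := hex
    have hRne : R ≠ [] := by
      intro hnil
      have := (hmemR m0).mpr ⟨hm0, hf0⟩
      simp [hnil] at this
    rw [if_neg hRne]
    obtain ⟨v, hv⟩ : ∃ v, PySem.List.max? R (fun x => x) = some v := by
      cases hmax : PySem.List.max? R (fun x => x) with
      | none => exact absurd ((PySem.List.max?_eq_none_iff R _).mp hmax) hRne
      | some v => exact ⟨v, rfl⟩
    rw [hv]
    have hvR := PySem.List.max?_mem hv
    have hvmax := PySem.List.max?_isMax hv
    obtain ⟨hvm, hvf⟩ := (hmemR v).mp hvR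
    have hm0L : m0 ∈ L := (PySem.List.mem_sorted mats _ true m0).mpr hm0
    obtain ⟨hbL, hbf, hbmax⟩ := loop_max park H W L
      (PySem.List.sorted_pairwise_rev mats (fun x => x)) m0 hm0L hf0
    have hbm : solAltLoop park H W L ∈ mats := (PySem.List.mem_sorted mats _ true _).mp hbL
    apply le_antisymm
    · exact hbmax v ((PySem.List.mem_sorted mats _ true v).mpr hvm) hvf
    · exact hvmax _ ((hmemR _).mpr ⟨hbm, hbf⟩)
  · have hRnil : R = [] := by
      rw [List.eq_nil_iff_forall_not_mem]
      intro v hvR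
      exact hex ⟨v, ((hmemR v).mp hvR).1, ((hmemR v).mp hvR).2⟩
    rw [if_pos hRnil]
    rw [loop_all_false park H W L (fun m hm => by
      have := (PySem.List.mem_sorted mats (fun x => x) true m).mp hm
      rcases hfm : fits m park H W with _ | _
      · rfl
      · exact absurd ⟨m, this, hfm⟩ hex)]

-- ===== VERDICT (by name: the statement is the Claim_ definition above) =====
theorem solution_spec : Claim_equal_solution := by
  intro mats park _ hpre
  exact solution_eq_alt mats park hpre
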